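-- pv_equiv track=rewrite | github.com/jang9205/Programmers_Algorithm | LEVEL1/모의고사.py | solution
-- ===== SOURCE A (Python) =====
-- def solution(answers):
--     answer = []
--     su1 = [1, 2, 3, 4, 5]
--     su2 = [2, 1, 2, 3, 2, 4, 2, 5]
--     su3 = [3, 3, 1, 1, 2, 2, 4, 4, 5, 5]
--     count1, count2, count3 = 0, 0, 0
--     for i in range(len(answers)):
--         if answers[i] == su1[i % 5]:
--             count1 += 1
--         if answers[i] == su2[i % 8]:
--             count2 += 1
--         if answers[i] == su3[i % 10]:
--             count3 += 1
--     if count1 > count2 and count1 > count3: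
--         return [1]
--     elif count2 > count1 and count2 > count3:
--         return [2]
--     elif count3 > count1 and count3 > count2:
--         return [3]
--     elif count1 == count2 and count1 != count3:
--         return [1, 2]
--     elif count2 == count3 and count1 != count2:
--         return [2, 3]
--     elif count1 == count3 and count2 != count3:
--         return [1, 3]
--     else:
--         return [1, 2, 3]
-- ===== SOURCE B (Python) =====
-- def solution(answers):
--     su1 = [1, 2, 3, 4, 5]
--     su2 = [2, 1, 2, 3, 2, 4, 2, 5]
--     su3 = [3, 3, 1, 1, 2, 2, 4, 4, 5, 5]
--     # one combined table over the common period lcm(5, 8, 10) = 40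
--     table = [(su1[r % 5], su2[r % 8], su3[r % 10]) for r in range(40)]
--     # histogram of 3-bit match masks (bit k set <=> supervisor k+1 matched here)
--     hist = [0] * 8
--     for i, a in enumerate(answers):
--         p, q, r = table[i % 40]
--         hist[(a == p) + 2 * (a == q) + 4 * (a == r)] += 1
--     # streaming argmax over the three supervisors
--     winners, best = [], -1
--     for k in (1, 2, 3):
--         c = sum(hist[m] for m in range(8) if (m >> (k - 1)) & 1)
--         if c > best:
--             winners, best = [k], c
--         elif c == best:
--             winners.append(k)
--     return winners
-- ===== Notes on version B (the rewrite author's own statement) =====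
-- stated objective: alternative
-- what changed: B precomputes one combined period-40 table (lcm of the three pattern lengths), builds a size-8 histogram of 3-bit match masks in the single pass, derives each supervisor's score by summing the histogram cells with that bit set, and picks the winners with a streaming argmax accumulator instead of A's three per-element comparisons against separate patterns and 7-way if/elif chain.
import Mathlib
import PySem

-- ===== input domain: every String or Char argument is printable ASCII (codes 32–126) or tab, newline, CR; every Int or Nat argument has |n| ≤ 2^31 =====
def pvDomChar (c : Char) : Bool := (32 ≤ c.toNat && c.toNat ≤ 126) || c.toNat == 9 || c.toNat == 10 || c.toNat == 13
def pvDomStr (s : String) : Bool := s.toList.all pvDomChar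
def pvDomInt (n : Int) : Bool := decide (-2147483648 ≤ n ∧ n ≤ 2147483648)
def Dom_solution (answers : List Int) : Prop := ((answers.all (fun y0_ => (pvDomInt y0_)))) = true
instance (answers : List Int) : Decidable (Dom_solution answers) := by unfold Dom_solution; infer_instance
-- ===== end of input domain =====

-- B replaces A's three per-element pattern comparisons and 7-way if/elif chain by a
-- combined period-40 table, a size-8 histogram of 3-bit match masks, per-supervisor
-- scores summed from the histogram, and a streaming argmax (alternative, same O(n)).

-- ===== PORT A =====
-- the loop 'for i in range(len(answers)): … answers[i] …' traverses index/element
-- pairs; ported as a fold over PySem.List.enumerate carrying the same three counters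
def solution (answers : List Int) : List Int :=
  let su1 : List Int := [1, 2, 3, 4, 5]
  let su2 : List Int := [2, 1, 2, 3, 2, 4, 2, 5]
  let su3 : List Int := [3, 3, 1, 1, 2, 2, 4, 4, 5, 5]
  let cs := (PySem.List.enumerate answers).foldl
    (fun (s : Int × Int × Int) ia =>
      let s := if PySem.List.pyGetD su1 (PySem.Int.mod ia.1 5) 0 = ia.2 then (s.1 + 1, s.2.1, s.2.2) else s
      let s := if PySem.List.pyGetD su2 (PySem.Int.mod ia.1 8) 0 = ia.2 then (s.1, s.2.1 + 1, s.2.2) else s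
      if PySem.List.pyGetD su3 (PySem.Int.mod ia.1 10) 0 = ia.2 then (s.1, s.2.1, s.2.2 + 1) else s)
    (0, 0, 0)
  let count1 := cs.1
  let count2 := cs.2.1
  let count3 := cs.2.2
  if count1 > count2 ∧ count1 > count3 then [1]
  else if count2 > count1 ∧ count2 > count3 then [2]
  else if count3 > count1 ∧ count3 > count2 then [3]
  else if count1 = count2 ∧ count1 ≠ count3 then [1, 2]
  else if count2 = count3 ∧ count1 ≠ count2 then [2, 3]
  else if count1 = count3 ∧ count2 ≠ count3 then [1, 3]
  else [1, 2, 3]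

-- ===== PORT B =====
-- the mask '(a == p) + 2*(a == q) + 4*(a == r)' is a sum of booleans, always in 0..7;
-- ported as the same sum of 0/1 indicators computed as a Nat list index (Python's
-- value is identical and nonnegative, so this is exact)
def solution_alt (answers : List Int) : List Int :=
  let su1 : List Int := [1, 2, 3, 4, 5]
  let su2 : List Int := [2, 1, 2, 3, 2, 4, 2, 5]
  let su3 : List Int := [3, 3, 1, 1, 2, 2, 4, 4, 5, 5]
  let table : List (Int × Int × Int) :=
    (PySem.List.pyRange 0 40 1).map (fun r =>
      (PySem.List.pyGetD su1 (PySem.Int.mod r 5) 0,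
       PySem.List.pyGetD su2 (PySem.Int.mod r 8) 0,
       PySem.List.pyGetD su3 (PySem.Int.mod r 10) 0))
  let hist := (PySem.List.enumerate answers).foldl
    (fun (hist : List Int) ia =>
      let t := PySem.List.pyGetD table (PySem.Int.mod ia.1 40) (0, 0, 0)
      let m : Nat := (if ia.2 = t.1 then 1 else 0) + 2 * (if ia.2 = t.2.1 then 1 else 0)
                     + 4 * (if ia.2 = t.2.2 then 1 else 0)
      hist.set m (hist.getD m 0 + 1))
    (List.replicate 8 (0 : Int))
  (([(1 : Int), 2, 3].foldl
    (fun (wb : List Int × Int) k =>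
      let c := (((PySem.List.pyRange 0 8 1).filter
                  (fun m : Int => PySem.Int.band (m >>> (k - 1).toNat) 1 = 1)).map
                  (fun m => PySem.List.pyGetD hist m 0)).sum
      if c > wb.2 then ([k], c)
      else if c = wb.2 then (wb.1 ++ [k], wb.2)
      else wb)
    ([], -1))).1

-- ===== PRECONDITION & SPEC =====
def Spec_solution (answers : List Int) (out : List Int) : Prop := out = solution_alt answers
instance (answers : List Int) (out : List Int) : Decidable (Spec_solution answers out) := by unfold Spec_solution; infer_instance

-- ===== CLAIM (what is proved, stated in full; the proofs are below) =====
def Claim_equal_solution : Prop := ∀ (answers : List Int), Dom_solution answers → Spec_solution answers (solution answers)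

-- ===== LEMMAS AND PROOFS =====
set_option maxHeartbeats 1000000

-- per-supervisor indicators and the 3-bit match mask (proof-only abbreviations)
def ind1 (ia : Int × Int) : Int := if PySem.List.pyGetD [1, 2, 3, 4, 5] (PySem.Int.mod ia.1 5) 0 = ia.2 then 1 else 0
def ind2 (ia : Int × Int) : Int := if PySem.List.pyGetD [2, 1, 2, 3, 2, 4, 2, 5] (PySem.Int.mod ia.1 8) 0 = ia.2 then 1 else 0
def ind3 (ia : Int × Int) : Int := if PySem.List.pyGetD [3, 3, 1, 1, 2, 2, 4, 4, 5, 5] (PySem.Int.mod ia.1 10) 0 = ia.2 then 1 else 0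

def maskOf (ia : Int × Int) : Nat :=
  (if PySem.List.pyGetD [1, 2, 3, 4, 5] (PySem.Int.mod ia.1 5) 0 = ia.2 then 1 else 0)
  + 2 * (if PySem.List.pyGetD [2, 1, 2, 3, 2, 4, 2, 5] (PySem.Int.mod ia.1 8) 0 = ia.2 then 1 else 0)
  + 4 * (if PySem.List.pyGetD [3, 3, 1, 1, 2, 2, 4, 4, 5, 5] (PySem.Int.mod ia.1 10) 0 = ia.2 then 1 else 0)

def nMask (j : Nat) (l : List (Int × Int)) : Int :=
  (l.map (fun ia => if maskOf ia = j then (1 : Int) else 0)).sum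

theorem nMask_cons (j : Nat) (x : Int × Int) (xs : List (Int × Int)) :
    nMask j (x :: xs) = (if maskOf x = j then (1 : Int) else 0) + nMask j xs := by
  simp [nMask]

-- A's counting fold in closed form
theorem fold_counts (l : List (Int × Int)) (c1 c2 c3 : Int) :
    l.foldl
      (fun (s : Int × Int × Int) ia =>
        let s := if PySem.List.pyGetD [1, 2, 3, 4, 5] (PySem.Int.mod ia.1 5) 0 = ia.2 then (s.1 + 1, s.2.1, s.2.2) else s
        let s := if PySem.List.pyGetD [2, 1, 2, 3, 2, 4, 2, 5] (PySem.Int.mod ia.1 8) 0 = ia.2 then (s.1, s.2.1 + 1, s.2.2) else s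
        if PySem.List.pyGetD [3, 3, 1, 1, 2, 2, 4, 4, 5, 5] (PySem.Int.mod ia.1 10) 0 = ia.2 then (s.1, s.2.1, s.2.2 + 1) else s)
      (c1, c2, c3)
    = (c1 + (l.map ind1).sum, c2 + (l.map ind2).sum, c3 + (l.map ind3).sum) := by
  induction l generalizing c1 c2 c3 with
  | nil => simp
  | cons x xs ih =>
    simp only [List.foldl_cons, List.map_cons, List.sum_cons, ind1, ind2, ind3]
    split_ifs <;> rw [ih] <;> simp [Prod.ext_iff] <;> omega

-- the combined period-40 table agrees with the three separate pattern lookups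
theorem table_lookup (i : Int) :
    PySem.List.pyGetD
      ((PySem.List.pyRange 0 40 1).map (fun r =>
        (PySem.List.pyGetD [1, 2, 3, 4, 5] (PySem.Int.mod r 5) 0,
         PySem.List.pyGetD [2, 1, 2, 3, 2, 4, 2, 5] (PySem.Int.mod r 8) 0,
         PySem.List.pyGetD [3, 3, 1, 1, 2, 2, 4, 4, 5, 5] (PySem.Int.mod r 10) 0)))
      (PySem.Int.mod i 40) ((0 : Int), (0 : Int), (0 : Int))
    = (PySem.List.pyGetD [1, 2, 3, 4, 5] (PySem.Int.mod i 5) 0,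
       PySem.List.pyGetD [2, 1, 2, 3, 2, 4, 2, 5] (PySem.Int.mod i 8) 0,
       PySem.List.pyGetD [3, 3, 1, 1, 2, 2, 4, 4, 5, 5] (PySem.Int.mod i 10) 0) := by
  have h40 : (0 : Int) < 40 := by norm_num
  have h0 := PySem.Int.mod_nonneg i h40
  have hlt := PySem.Int.mod_lt i h40
  rw [PySem.List.pyGetD_map_pyRange_of_nonneg _ 40 _ _ h0 hlt]
  have e5 : PySem.Int.mod (PySem.Int.mod i 40) 5 = PySem.Int.mod i 5 := by
    rw [PySem.Int.mod_eq_emod_of_pos h40, PySem.Int.mod_eq_emod_of_pos (by norm_num : (0:Int) < 5),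
        PySem.Int.mod_eq_emod_of_pos (by norm_num : (0:Int) < 5), Int.emod_emod_of_dvd _ (by norm_num)]
  have e8 : PySem.Int.mod (PySem.Int.mod i 40) 8 = PySem.Int.mod i 8 := by
    rw [PySem.Int.mod_eq_emod_of_pos h40, PySem.Int.mod_eq_emod_of_pos (by norm_num : (0:Int) < 8),
        PySem.Int.mod_eq_emod_of_pos (by norm_num : (0:Int) < 8), Int.emod_emod_of_dvd _ (by norm_num)]
  have e10 : PySem.Int.mod (PySem.Int.mod i 40) 10 = PySem.Int.mod i 10 := by
    rw [PySem.Int.mod_eq_emod_of_pos h40, PySem.Int.mod_eq_emod_of_pos (by norm_num : (0:Int) < 10),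
        PySem.Int.mod_eq_emod_of_pos (by norm_num : (0:Int) < 10), Int.emod_emod_of_dvd _ (by norm_num)]
  rw [e5, e8, e10]

-- B's histogram fold in closed form
theorem hist_fold (l : List (Int × Int)) (h0 h1 h2 h3 h4 h5 h6 h7 : Int) :
    l.foldl
      (fun (hist : List Int) ia =>
        hist.set (maskOf ia) (hist.getD (maskOf ia) 0 + 1))
      [h0, h1, h2, h3, h4, h5, h6, h7]
    = [h0 + nMask 0 l, h1 + nMask 1 l, h2 + nMask 2 l, h3 + nMask 3 l,
       h4 + nMask 4 l, h5 + nMask 5 l, h6 + nMask 6 l, h7 + nMask 7 l] := by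
  induction l generalizing h0 h1 h2 h3 h4 h5 h6 h7 with
  | nil => simp [nMask]
  | cons x xs ih =>
    rw [List.foldl_cons]
    have hset : ([h0, h1, h2, h3, h4, h5, h6, h7].set (maskOf x)
        ([h0, h1, h2, h3, h4, h5, h6, h7].getD (maskOf x) 0 + 1))
      = [h0 + (if maskOf x = 0 then (1:Int) else 0), h1 + (if maskOf x = 1 then 1 else 0),
         h2 + (if maskOf x = 2 then 1 else 0), h3 + (if maskOf x = 3 then 1 else 0),
         h4 + (if maskOf x = 4 then 1 else 0), h5 + (if maskOf x = 5 then 1 else 0),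
         h6 + (if maskOf x = 6 then 1 else 0), h7 + (if maskOf x = 7 then 1 else 0)] := by
      have h8 : maskOf x < 8 := by unfold maskOf; split_ifs <;> norm_num
      set m := maskOf x with hm
      interval_cases m <;> simp
    rw [hset, ih]
    simp only [nMask_cons, List.cons.injEq]
    refine ⟨?_, ?_, ?_, ?_, ?_, ?_, ?_, ?_, trivial⟩ <;> ring

-- summing the histogram cells with bit k set recovers supervisor k's direct count
theorem bit1_sum (l : List (Int × Int)) :
    nMask 1 l + nMask 3 l + nMask 5 l + nMask 7 l = (l.map ind1).sum := by
  induction l with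
  | nil => simp [nMask]
  | cons x xs ih =>
    simp only [nMask_cons, List.map_cons, List.sum_cons]
    have h : (if maskOf x = 1 then (1:Int) else 0) + (if maskOf x = 3 then 1 else 0)
        + (if maskOf x = 5 then 1 else 0) + (if maskOf x = 7 then 1 else 0) = ind1 x := by
      unfold maskOf ind1
      split_ifs <;> omega
    omega

theorem bit2_sum (l : List (Int × Int)) :
    nMask 2 l + nMask 3 l + nMask 6 l + nMask 7 l = (l.map ind2).sum := by
  induction l with
  | nil => simp [nMask]
  | cons x xs ih =>
    simp only [nMask_cons, List.map_cons, List.sum_cons]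
    have h : (if maskOf x = 2 then (1:Int) else 0) + (if maskOf x = 3 then 1 else 0)
        + (if maskOf x = 6 then 1 else 0) + (if maskOf x = 7 then 1 else 0) = ind2 x := by
      unfold maskOf ind2
      split_ifs <;> omega
    omega

theorem bit3_sum (l : List (Int × Int)) :
    nMask 4 l + nMask 5 l + nMask 6 l + nMask 7 l = (l.map ind3).sum := by
  induction l with
  | nil => simp [nMask]
  | cons x xs ih =>
    simp only [nMask_cons, List.map_cons, List.sum_cons]
    have h : (if maskOf x = 4 then (1:Int) else 0) + (if maskOf x = 5 then 1 else 0)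
        + (if maskOf x = 6 then 1 else 0) + (if maskOf x = 7 then 1 else 0) = ind3 x := by
      unfold maskOf ind3
      split_ifs <;> omega
    omega

theorem nMask_nonneg (j : Nat) (l : List (Int × Int)) : 0 ≤ nMask j l := by
  unfold nMask
  apply List.sum_nonneg
  intro x hx
  obtain ⟨a, ha, rfl⟩ := List.mem_map.1 hx
  split_ifs <;> norm_num

-- the streaming argmax over the literal histogram equals A's 7-way chain
theorem winners_eq (h0 h1 h2 h3 h4 h5 h6 h7 : Int)
    (p1 : 0 ≤ h1) (p3 : 0 ≤ h3) (p5 : 0 ≤ h5) (p7 : 0 ≤ h7) :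
    (([(1 : Int), 2, 3].foldl
      (fun (wb : List Int × Int) k =>
        let c := (((PySem.List.pyRange 0 8 1).filter
                    (fun m : Int => PySem.Int.band (m >>> (k - 1).toNat) 1 = 1)).map
                    (fun m => PySem.List.pyGetD [h0, h1, h2, h3, h4, h5, h6, h7] m 0)).sum
        if c > wb.2 then ([k], c)
        else if c = wb.2 then (wb.1 ++ [k], wb.2)
        else wb)
      ([], -1))).1
    = (let c1 := h1 + h3 + h5 + h7
       let c2 := h2 + h3 + h6 + h7
       let c3 := h4 + h5 + h6 + h7
       if c1 > c2 ∧ c1 > c3 then ([1] : List Int)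
       else if c2 > c1 ∧ c2 > c3 then [2]
       else if c3 > c1 ∧ c3 > c2 then [3]
       else if c1 = c2 ∧ c1 ≠ c3 then [1, 2]
       else if c2 = c3 ∧ c1 ≠ c2 then [2, 3]
       else if c1 = c3 ∧ c2 ≠ c3 then [1, 3]
       else [1, 2, 3]) := by
  have hr : PySem.List.pyRange 0 8 1 = [0, 1, 2, 3, 4, 5, 6, 7] := by decide
  have hc1 : (((PySem.List.pyRange 0 8 1).filter
                    (fun m : Int => PySem.Int.band (m >>> ((((1:Int) - 1).toNat : Nat) : Int)) 1 = 1)).map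
                    (fun m => PySem.List.pyGetD [h0, h1, h2, h3, h4, h5, h6, h7] m 0)).sum
      = h1 + h3 + h5 + h7 := by
    rw [hr, show (([0,1,2,3,4,5,6,7] : List Int).filter
         (fun m : Int => PySem.Int.band (m >>> ((((1:Int) - 1).toNat : Nat) : Int)) 1 = 1)) = [1,3,5,7] from by decide]
    norm_num [PySem.List.pyGetD, show Int.toNat 1 = 1 from rfl, show Int.toNat 3 = 3 from rfl, show Int.toNat 5 = 5 from rfl, show Int.toNat 7 = 7 from rfl]
    ring
  have hc2 : (((PySem.List.pyRange 0 8 1).filter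
                    (fun m : Int => PySem.Int.band (m >>> ((((2:Int) - 1).toNat : Nat) : Int)) 1 = 1)).map
                    (fun m => PySem.List.pyGetD [h0, h1, h2, h3, h4, h5, h6, h7] m 0)).sum
      = h2 + h3 + h6 + h7 := by
    rw [hr, show (([0,1,2,3,4,5,6,7] : List Int).filter
         (fun m : Int => PySem.Int.band (m >>> ((((2:Int) - 1).toNat : Nat) : Int)) 1 = 1)) = [2,3,6,7] from by decide]
    norm_num [PySem.List.pyGetD, show Int.toNat 2 = 2 from rfl, show Int.toNat 3 = 3 from rfl, show Int.toNat 6 = 6 from rfl, show Int.toNat 7 = 7 from rfl]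
    ring
  have hc3 : (((PySem.List.pyRange 0 8 1).filter
                    (fun m : Int => PySem.Int.band (m >>> ((((3:Int) - 1).toNat : Nat) : Int)) 1 = 1)).map
                    (fun m => PySem.List.pyGetD [h0, h1, h2, h3, h4, h5, h6, h7] m 0)).sum
      = h4 + h5 + h6 + h7 := by
    rw [hr, show (([0,1,2,3,4,5,6,7] : List Int).filter
         (fun m : Int => PySem.Int.band (m >>> ((((3:Int) - 1).toNat : Nat) : Int)) 1 = 1)) = [4,5,6,7] from by decide]
    norm_num [PySem.List.pyGetD, show Int.toNat 4 = 4 from rfl, show Int.toNat 5 = 5 from rfl, show Int.toNat 6 = 6 from rfl, show Int.toNat 7 = 7 from rfl]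
    ring
  simp only [List.foldl_cons, List.foldl_nil, hc1, hc2, hc3]
  split_ifs <;> first | rfl | omega

-- ===== VERDICT (by name: the statement is the Claim_ definition above) =====
theorem solution_spec : Claim_equal_solution := by
  intro answers _
  show solution answers = solution_alt answers
  simp only [solution, solution_alt]
  -- replace the table lookup by the three direct pattern lookups, then fold the histogram
  have hfun : (fun (hist : List Int) (ia : Int × Int) =>
      let t := PySem.List.pyGetD
        ((PySem.List.pyRange 0 40 1).map (fun r =>
          (PySem.List.pyGetD [1, 2, 3, 4, 5] (PySem.Int.mod r 5) 0,
           PySem.List.pyGetD [2, 1, 2, 3, 2, 4, 2, 5] (PySem.Int.mod r 8) 0,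
           PySem.List.pyGetD [3, 3, 1, 1, 2, 2, 4, 4, 5, 5] (PySem.Int.mod r 10) 0)))
        (PySem.Int.mod ia.1 40) ((0 : Int), (0 : Int), (0 : Int))
      let m : Nat := (if ia.2 = t.1 then 1 else 0) + 2 * (if ia.2 = t.2.1 then 1 else 0)
                     + 4 * (if ia.2 = t.2.2 then 1 else 0)
      hist.set m (hist.getD m 0 + 1))
    = (fun hist ia => hist.set (maskOf ia) (hist.getD (maskOf ia) 0 + 1)) := by
    funext hist ia
    simp only [table_lookup ia.1, maskOf]
    have e1 : (if ia.2 = PySem.List.pyGetD [1, 2, 3, 4, 5] (PySem.Int.mod ia.1 5) 0 then (1:Nat) else 0)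
        = (if PySem.List.pyGetD [1, 2, 3, 4, 5] (PySem.Int.mod ia.1 5) 0 = ia.2 then 1 else 0) := by
      simp [eq_comm]
    have e2 : (if ia.2 = PySem.List.pyGetD [2, 1, 2, 3, 2, 4, 2, 5] (PySem.Int.mod ia.1 8) 0 then (1:Nat) else 0)
        = (if PySem.List.pyGetD [2, 1, 2, 3, 2, 4, 2, 5] (PySem.Int.mod ia.1 8) 0 = ia.2 then 1 else 0) := by
      simp [eq_comm]
    have e3 : (if ia.2 = PySem.List.pyGetD [3, 3, 1, 1, 2, 2, 4, 4, 5, 5] (PySem.Int.mod ia.1 10) 0 then (1:Nat) else 0)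
        = (if PySem.List.pyGetD [3, 3, 1, 1, 2, 2, 4, 4, 5, 5] (PySem.Int.mod ia.1 10) 0 = ia.2 then 1 else 0) := by
      simp [eq_comm]
    rw [e1, e2, e3]
  rw [hfun, show List.replicate 8 (0 : Int) = [0, 0, 0, 0, 0, 0, 0, 0] from rfl,
     hist_fold, fold_counts]
  simp only [zero_add]
  rw [winners_eq _ _ _ _ _ _ _ _ (nMask_nonneg 1 _) (nMask_nonneg 3 _) (nMask_nonneg 5 _) (nMask_nonneg 7 _)]
  rw [bit1_sum, bit2_sum, bit3_sum]
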